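-- pv_equiv track=rewrite | github.com/xBurningGiraffe/Synack-Red-Team | subnetter.py | pretty_print_ips
-- ===== SOURCE A (Python) =====
-- def pretty_print_ips(ips):
--   """Pretty prints the IPs in groups.
--
--   Args:
--     ips: A list of IP addresses.
--
--   Returns:
--     A string containing the pretty printed IPs.
--   """
--
--   groups = []
--   for i in range(0, len(ips), 256):
--     groups.append(ips[i:i + 256])
--
--   output = ""
--   for group in groups:
--     output += "\n".join([str(ip) for ip in group]) + "\n"
--
--   return output
-- ===== SOURCE B (Python) =====
-- def pretty_print_ips(ips):
--   """Pretty prints the IPs in groups.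
--
--   Args:
--     ips: A list of IP addresses.
--
--   Returns:
--     A string containing the pretty printed IPs.
--   """
--   return "".join(str(ip) + "\n" for ip in ips)
-- ===== Notes on version B (the rewrite author's own statement) =====
-- stated objective: simpler
-- what changed: B drops the intermediate 256-sized chunk list and the nested join-per-chunk pass entirely, emitting each element followed by a newline in one flat join over ips.
import Mathlib
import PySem

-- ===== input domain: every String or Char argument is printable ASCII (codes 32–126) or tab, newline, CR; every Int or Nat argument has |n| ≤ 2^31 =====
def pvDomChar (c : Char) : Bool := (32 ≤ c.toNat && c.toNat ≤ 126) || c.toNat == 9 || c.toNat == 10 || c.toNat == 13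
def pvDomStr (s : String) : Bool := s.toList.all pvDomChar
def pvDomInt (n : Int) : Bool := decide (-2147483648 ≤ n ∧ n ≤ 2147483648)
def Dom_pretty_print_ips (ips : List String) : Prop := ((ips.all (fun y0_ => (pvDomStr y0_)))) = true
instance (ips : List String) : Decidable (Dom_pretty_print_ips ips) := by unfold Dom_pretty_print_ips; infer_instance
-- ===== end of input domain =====

-- B drops the 256-sized chunking pass of A and joins each element with a trailing newline in one flat pass (objective: simpler).

-- ===== PORT A =====
def pretty_print_ips (ips : List String) : String :=
  -- groups = []; for i in range(0, len(ips), 256): groups.append(ips[i:i+256])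
  let groups : List (List String) :=
    (PySem.List.pyRange 0 (PySem.List.len ips) 256).foldl
      (fun gs i => gs ++ [PySem.List.slice ips (some i) (some (i + 256))]) []
  -- output = ""; for group in groups: output += "\n".join([str(ip) for ip in group]) + "\n"
  groups.foldl
    (fun output group =>
      output ++ (PySem.Str.join "\n" (group.map (fun ip => ip)) ++ "\n")) ""

-- ===== PORT B =====
def pretty_print_ips_alt (ips : List String) : String :=
  -- return "".join(str(ip) + "\n" for ip in ips)
  PySem.Str.join "" (ips.map (fun ip => ip ++ "\n"))

-- ===== PRECONDITION & SPEC =====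
def Spec_pretty_print_ips (ips : List String) (out : String) : Prop := out = pretty_print_ips_alt ips
instance (ips : List String) (out : String) : Decidable (Spec_pretty_print_ips ips out) := by unfold Spec_pretty_print_ips; infer_instance

-- ===== CLAIM (what is proved, stated in full; the proofs are below) =====
def Claim_equal_pretty_print_ips : Prop := ∀ (ips : List String), Dom_pretty_print_ips ips → Spec_pretty_print_ips ips (pretty_print_ips ips)

-- ===== LEMMAS AND PROOFS =====

-- the flat newline-terminated rendering both programs compute, at the List Char level
def pvFlat (xs : List String) : List Char :=
  (xs.map (fun s => s.toList ++ ['\n'])).flatten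

theorem pvFlat_append (xs ys : List String) :
    pvFlat (xs ++ ys) = pvFlat xs ++ pvFlat ys := by
  simp [pvFlat]

-- "\n".join(group) + "\n" is the flat rendering, for a nonempty group
theorem join_newline (g : List String) (hg : g ≠ []) :
    PySem.Chars.join ['\n'] (g.map String.toList) ++ ['\n'] = pvFlat g := by
  induction g with
  | nil => simp at hg
  | cons p rest ih =>
    cases rest with
    | nil => simp [PySem.Chars.join_singleton, pvFlat]
    | cons q rest' =>
      simp only [List.map_cons]
      rw [PySem.Chars.join_cons_cons]
      have hrec := ih (by simp)
      simp only [pvFlat, List.map_cons, List.flatten_cons] at hrec ⊢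
      rw [List.append_assoc, List.append_assoc, hrec]
      simp

-- "".join(parts) is flatten
theorem join_empty_sep (parts : List (List Char)) :
    PySem.Chars.join [] parts = parts.flatten := by
  induction parts with
  | nil => simp [PySem.Chars.join_nil]
  | cons p rest ih =>
    cases rest with
    | nil => simp [PySem.Chars.join_singleton]
    | cons q rest' =>
      rw [PySem.Chars.join_cons_cons, ih]
      simp

-- the chunk decomposition: flattening the ceil(N/256)-many 256-chunks renders the whole list
theorem chunks_flat (xs : List String) :
    ((List.range ((xs.length + 255) / 256)).map
      (fun k => pvFlat ((xs.drop (256 * k)).take 256))).flatten = pvFlat xs := by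
  induction hN : xs.length using Nat.strong_induction_on generalizing xs with
  | _ N ih =>
    subst hN
    cases xs with
    | nil => simp [pvFlat]
    | cons x xt =>
      have hcnt : ((x :: xt).length + 255) / 256 = (((x :: xt).drop 256).length + 255) / 256 + 1 := by
        simp only [List.length_drop]
        simp only [List.length_cons]
        omega
      rw [hcnt, List.range_succ_eq_map]
      simp only [List.map_cons, List.map_map, List.flatten_cons]
      have hmapeq : (List.range ((((x :: xt).drop 256).length + 255) / 256)).map
            ((fun k => pvFlat (((x :: xt).drop (256 * k)).take 256)) ∘ Nat.succ)
          = (List.range ((((x :: xt).drop 256).length + 255) / 256)).map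
            (fun k => pvFlat ((((x :: xt).drop 256).drop (256 * k)).take 256)) := by
        apply List.map_congr_left
        intro k _
        simp only [Function.comp_apply, List.drop_drop]
        congr 3
        omega
      rw [hmapeq]
      have hlt : ((x :: xt).drop 256).length < (x :: xt).length := by
        simp only [List.length_drop, List.length_cons]
        omega
      rw [ih _ hlt _ rfl]
      simp only [Nat.mul_zero, List.drop_zero]
      rw [← pvFlat_append, List.take_append_drop]

-- a 256-chunk of a nonempty list is nonempty (for the indices range actually produces)
theorem chunk_ne_nil (xs : List String) (k : Nat) (hk : k < (xs.length + 255) / 256) :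
    (xs.drop (256 * k)).take 256 ≠ [] := by
  have h : 256 * k < xs.length := by omega
  simp only [ne_eq, List.take_eq_nil_iff, List.drop_eq_nil_iff]
  omega

-- A's output at the List Char level
theorem portA_toList (ips : List String) :
    (pretty_print_ips ips).toList = pvFlat ips := by
  unfold pretty_print_ips
  rw [PySem.List.foldl_append_singleton_eq_map]
  simp only [List.nil_append]
  rw [PySem.List.pyRange_of_pos 0 (PySem.List.len ips) (by norm_num : (0:Int) < 256)]
  rw [List.map_map]
  -- the string-concatenation fold, at the toList level
  have hfold : ∀ (gs : List (List String)) (acc : String),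
      (gs.foldl (fun output group =>
        output ++ (PySem.Str.join "\n" (group.map (fun ip => ip)) ++ "\n")) acc).toList
      = acc.toList ++ (gs.map (fun g => PySem.Chars.join ['\n'] (g.map String.toList) ++ ['\n'])).flatten := by
    intro gs
    induction gs with
    | nil => intro acc; simp
    | cons g gt ihg =>
      intro acc
      simp only [List.foldl_cons, List.map_cons, List.flatten_cons]
      rw [ihg]
      simp only [String.toList_append, PySem.Str.toList_join, List.map_id']
      have hsep : ("\n" : String).toList = ['\n'] := rfl
      have hnl : ("\n" : String).toList = ['\n'] := rfl
      rw [hsep, List.append_assoc]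
  rw [hfold]
  have h0 : ("" : String).toList = ([] : List Char) := rfl
  rw [h0, List.nil_append]
  have hcount : (if (0:Int) < PySem.List.len ips
        then ((PySem.List.len ips - 0 + 256 - 1) / 256).toNat else 0)
      = (ips.length + 255) / 256 := by
    simp only [PySem.List.len_eq]
    split_ifs with h
    · omega
    · omega
  rw [hcount, List.map_map]
  refine Eq.trans ?_ (chunks_flat ips)
  congr 1
  apply List.map_congr_left
  intro k hk
  simp only [Function.comp_apply, zero_add]
  have hc2 : (256 * (k : Int) + 256) = (((256 * k : Nat) : Int) + ((256 : Nat) : Int)) := by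
    push_cast; ring
  have hc : (256 * (k : Int)) = ((256 * k : Nat) : Int) := by push_cast; ring
  rw [hc2, hc, PySem.List.slice_natCast_add]
  exact join_newline _ (chunk_ne_nil ips k (List.mem_range.mp hk))

-- B's output at the List Char level
theorem portB_toList (ips : List String) :
    (pretty_print_ips_alt ips).toList = pvFlat ips := by
  unfold pretty_print_ips_alt
  rw [PySem.Str.toList_join]
  have h0 : ("" : String).toList = ([] : List Char) := rfl
  rw [h0, join_empty_sep]
  simp only [List.map_map]
  unfold pvFlat
  congr 1
  apply List.map_congr_left
  intro s _
  simp only [Function.comp_apply, String.toList_append]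
  rfl

-- ===== VERDICT (by name: the statement is the Claim_ definition above) =====
theorem pretty_print_ips_spec : Claim_equal_pretty_print_ips := by
  intro ips _
  unfold Spec_pretty_print_ips
  have h : (pretty_print_ips ips).toList = (pretty_print_ips_alt ips).toList := by
    rw [portA_toList, portB_toList]
  have := congrArg String.ofList h
  simpa using this
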